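-- pv_equiv track=rewrite | github.com/nedylys/BPI | TP17/draw.py | draw_pi_text
-- ===== SOURCE A (Python) =====
-- def draw_pi_text(color_data, pi, center_x, center_y, taille):
--     # Colors for each digit of pi
--     digit_colors = {
--         '0': "255 255 255 ",  # White for 0
--         '1': "255 0 0 ",       # Red for 1
--         '2': "0 255 0 ",       # Green for 2
--         '3': "0 0 255 ",       # Blue for 3
--         '4': "255 255 0 ",     # Yellow for 4
--         '5': "255 0 255 ",     # Magenta for 5
--         '6': "0 255 255 ",     # Cyan for 6
--         '7': "128 128 128 ",   # Gray for 7
--         '8': "255 165 0 ",     # Orange for 8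
--         '9': "0 128 0 "        # Dark Green for 9
--     }
--
--     # Convert Pi to a string and split into digits
--     pi_digits = str(pi).replace('.', '')  # Remove the decimal point
--     text_index = 0
--
--     # Loop to draw each digit in the center of the image
--     for i in range(center_y - 10, center_y + 10):
--         for j in range(center_x - 30, center_x + 30):
--             if text_index < len(pi_digits):
--                 char = pi_digits[text_index]
--                 if char in digit_colors:
--                     color = digit_colors[char]
--                     color_data[i][j] = color
--                 text_index += 1
--     return color_data
-- ===== SOURCE B (Python) =====
-- def draw_pi_text(color_data, pi, center_x, center_y, taille):
--     # Two staged passes instead of nested loops with a running text_index: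
--     # first chunk the digit string into 60-character rows, then overlay each
--     # chunk on its grid row by zipping; zip truncation replaces the 1200-cell
--     # cap (20 rows x 60 columns).  Colors come from a list indexed by the
--     # digit's value instead of a char-keyed dict.  Mutates color_data in
--     # place, like the original.
--     palette = ["255 255 255 ", "255 0 0 ", "0 255 0 ", "0 0 255 ", "255 255 0 ",
--                "255 0 255 ", "0 255 255 ", "128 128 128 ", "255 165 0 ", "0 128 0 "]
--     digits = str(pi).replace('.', '')
--     chunks = [digits[r:r + 60] for r in range(0, len(digits), 60)]
--     for i, chunk in zip(range(center_y - 10, center_y + 10), chunks):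
--         for j, ch in zip(range(center_x - 30, center_x + 30), chunk):
--             if ch.isdigit():
--                 color_data[i][j] = palette[int(ch)]
--     return color_data
-- ===== Notes on version B (the rewrite author's own statement) =====
-- stated objective: alternative
-- what changed: Replaces the nested row/column scan with its running text_index by two staged passes: the digit string is first chunked into 60-character rows, then each chunk is overlaid on its grid row by zipping with the row and column ranges (zip truncation supplies the 20x60 cap), colors coming from a list indexed by the digit's value instead of a char-keyed dict.
import Mathlib
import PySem

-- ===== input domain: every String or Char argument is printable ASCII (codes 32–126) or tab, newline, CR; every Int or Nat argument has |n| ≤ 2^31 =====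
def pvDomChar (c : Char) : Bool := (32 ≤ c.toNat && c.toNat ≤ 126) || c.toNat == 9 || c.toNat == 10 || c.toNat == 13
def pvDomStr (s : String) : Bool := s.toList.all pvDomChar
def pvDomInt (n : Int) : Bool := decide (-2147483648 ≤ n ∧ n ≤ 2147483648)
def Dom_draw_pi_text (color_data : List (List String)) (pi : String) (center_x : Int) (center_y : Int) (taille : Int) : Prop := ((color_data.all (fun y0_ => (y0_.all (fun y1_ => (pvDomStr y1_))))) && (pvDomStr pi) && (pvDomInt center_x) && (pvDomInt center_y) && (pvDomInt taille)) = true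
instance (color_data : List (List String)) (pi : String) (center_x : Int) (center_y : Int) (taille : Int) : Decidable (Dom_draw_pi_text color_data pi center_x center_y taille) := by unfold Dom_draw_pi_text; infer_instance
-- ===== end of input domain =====

-- B replaces A's nested row/column scan with a running text_index by two staged passes: chunk the
-- digit string into 60-character rows, then overlay each chunk on its grid row by zipping with the
-- row/column ranges (zip truncation replaces the 1200-cell cap), colors taken from a list indexed
-- by the digit value instead of a char-keyed dict.  Both A and B mutate color_data in place
-- identically; the theorems are about the returned value.

-- ===== PORT A =====
-- the digit_colors dict (keys are the single characters '0'..'9')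
def pvColors : PySem.Dict Char String :=
  PySem.Dict.ofList [('0', "255 255 255 "), ('1', "255 0 0 "), ('2', "0 255 0 "),
    ('3', "0 0 255 "), ('4', "255 255 0 "), ('5', "255 0 255 "), ('6', "0 255 255 "),
    ('7', "128 128 128 "), ('8', "255 165 0 "), ('9', "0 128 0 ")]

-- color_data[i][j] = v : Python-exact (negative indices count from the end) whenever both
-- indices are in range; a no-op where Python would raise IndexError (excluded by Pre_).
def pvSetCell (g : List (List String)) (i j : Int) (v : String) : List (List String) :=
  PySem.List.pySetD g i (PySem.List.pySetD (PySem.List.pyGetD g i []) j v)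

-- the body of A's innermost loop: state = (color_data, text_index)
def pvCell (cs : List Char) (i j : Int) (st : List (List String) × Nat) :
    List (List String) × Nat :=
  if st.2 < cs.length then
    match pvColors.get? (cs.getD st.2 ' ') with
    | some color => (pvSetCell st.1 i j color, st.2 + 1)
    | none => (st.1, st.2 + 1)
  else st

def draw_pi_text (color_data : List (List String)) (pi : String) (center_x : Int) (center_y : Int) (taille : Int) : List (List String) :=
  -- pi_digits = str(pi).replace('.', '') is (PySem.Str.replace pi "." "").toList, inlined
  ((PySem.List.pyRange (center_y - 10) (center_y + 10) 1).foldl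
    (fun st i =>
      (PySem.List.pyRange (center_x - 30) (center_x + 30) 1).foldl
        (fun st' j => pvCell (PySem.Str.replace pi "." "").toList i j st') st)
    (color_data, 0)).1

-- ===== PORT B =====
-- the palette list, indexed by the digit's value
def pvPalette : List String := ["255 255 255 ", "255 0 0 ", "0 255 0 ", "0 0 255 ",
  "255 255 0 ", "255 0 255 ", "0 255 255 ", "128 128 128 ", "255 165 0 ", "0 128 0 "]

-- digits = str(pi).replace('.', '')
def pvDigits (pi : String) : List Char := (PySem.Str.replace pi "." "").toList

-- chunks = [digits[r:r+60] for r in range(0, len(digits), 60)]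
def pvChunks (digits : List Char) : List (List Char) :=
  (PySem.List.pyRange 0 (PySem.List.len digits) 60).map
    (fun r => PySem.List.slice digits (some r) (some (r + 60)))

def draw_pi_text_alt (color_data : List (List String)) (pi : String) (center_x : Int) (center_y : Int) (taille : Int) : List (List String) :=
  ((PySem.List.pyRange (center_y - 10) (center_y + 10) 1).zip (pvChunks (pvDigits pi))).foldl
    (fun g p =>
      ((PySem.List.pyRange (center_x - 30) (center_x + 30) 1).zip p.2).foldl
        (fun g' q =>
          -- ch.isdigit() on the 1-char string; under that guard int(ch) succeeds and is
          -- 0..9, so palette[int(ch)] is in range: the getD defaults are never taken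
          if PySem.Chars.strIsdigit [q.2] then
            pvSetCell g' p.1 q.1
              (PySem.List.pyGetD pvPalette ((PySem.Int.ofChars? [q.2]).getD 0) "")
          else g') g)
    color_data

-- ===== PRECONDITION & SPEC =====
-- Pre_ = exactly the inputs where A returns: every cell actually assigned (digit character at
-- linear position k < min(1200, #digits)) has both its row and its column index in Python range
-- (negative indices count from the end); otherwise Python raises IndexError.
def Pre_draw_pi_text (color_data : List (List String)) (pi : String) (center_x : Int) (center_y : Int) (taille : Int) : Prop :=
  ∀ k : Nat, k < min 1200 ((PySem.Str.replace pi "." "").toList.length) →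
    pvColors.contains ((PySem.Str.replace pi "." "").toList.getD k ' ') = true →
    PySem.Raise.InRange color_data.length (center_y - 10 + ((k / 60 : Nat) : Int)) ∧
    PySem.Raise.InRange
      (PySem.List.pyGetD color_data (center_y - 10 + ((k / 60 : Nat) : Int)) []).length
      (center_x - 30 + ((k % 60 : Nat) : Int))
instance (color_data : List (List String)) (pi : String) (center_x : Int) (center_y : Int) (taille : Int) : Decidable (Pre_draw_pi_text color_data pi center_x center_y taille) := by unfold Pre_draw_pi_text; infer_instance

def pvWitness_draw_pi_text : List (List String) × String × Int × Int × Int :=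
  ([["w"]], "3", 30, 10, 0)

def Spec_draw_pi_text (color_data : List (List String)) (pi : String) (center_x : Int) (center_y : Int) (taille : Int) (out : List (List String)) : Prop := out = draw_pi_text_alt color_data pi center_x center_y taille
instance (color_data : List (List String)) (pi : String) (center_x : Int) (center_y : Int) (taille : Int) (out : List (List String)) : Decidable (Spec_draw_pi_text color_data pi center_x center_y taille out) := by unfold Spec_draw_pi_text; infer_instance

-- ===== CLAIM (what is proved, stated in full; the proofs are below) =====
def Claim_equal_draw_pi_text : Prop := ∀ (color_data : List (List String)) (pi : String) (center_x : Int) (center_y : Int) (taille : Int), Dom_draw_pi_text color_data pi center_x center_y taille → Pre_draw_pi_text color_data pi center_x center_y taille → Spec_draw_pi_text color_data pi center_x center_y taille (draw_pi_text color_data pi center_x center_y taille)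

-- ===== LEMMAS AND PROOFS =====

-- the action at linear position k, in Nat form (both ports reduce to a fold of this)
def pvActK (cs : List Char) (cx cy : Int) (g : List (List String)) (k : Nat) : List (List String) :=
  match pvColors.get? (cs.getD k ' ') with
  | some color =>
      pvSetCell g (cy - 10 + ((k / 60 : Nat) : Int)) (cx - 30 + ((k % 60 : Nat) : Int)) color
  | none => g

theorem pvActK_noop {cs : List Char} {cx cy : Int} {g : List (List String)} {k : Nat}
    (h : cs.length ≤ k) : pvActK cs cx cy g k = g := by
  unfold pvActK
  rw [List.getD_eq_default _ _ h]
  have hc : pvColors.get? ' ' = none := by decide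
  rw [hc]

theorem pvFold_noop {cs : List Char} {cx cy : Int} (l : List Nat) (g : List (List String))
    (h : ∀ k ∈ l, cs.length ≤ k) : l.foldl (pvActK cs cx cy) g = g := by
  induction l generalizing g with
  | nil => rfl
  | cons a t ih =>
      simp only [List.foldl_cons]
      rw [pvActK_noop (h a (by simp)), ih _ (fun k hk => h k (by simp [hk]))]

theorem pvInner_noop {cs : List Char} {i : Int} (l : List Int)
    (g : List (List String)) (t : Nat) (h : cs.length ≤ t) :
    l.foldl (fun st j => pvCell cs i j st) (g, t) = (g, t) := by
  induction l with
  | nil => rfl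
  | cons a l ih =>
      simp only [List.foldl_cons]
      have : pvCell cs i a (g, t) = (g, t) := by
        unfold pvCell; simp [Nat.not_lt.mpr h]
      rw [this, ih]

theorem pvInner (cs : List Char) (cx cy : Int) (r : Nat) :
    ∀ (m : Nat), m ≤ 60 → 60 * r ≤ cs.length → ∀ g : List (List String),
      (List.range m).foldl
          (fun st (c : Nat) => pvCell cs (cy - 10 + (r : Int)) (cx - 30 + (c : Int)) st)
          (g, 60 * r)
        = ((List.range' (60 * r) m).foldl (pvActK cs cx cy) g, min (60 * r + m) cs.length) := by
  intro m
  induction m with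
  | zero =>
      intro _ hr g
      simp [Nat.min_eq_left hr]
  | succ m ih =>
      intro hm hr g
      rw [List.range_succ, List.foldl_append, ih (by omega) hr g]
      have hcat : List.range' (60 * r) m ++ [60 * r + m] = List.range' (60 * r) (m + 1) := by
        rw [List.range'_1_concat]
      rw [← hcat, List.foldl_append]
      simp only [List.foldl_cons, List.foldl_nil]
      by_cases h : 60 * r + m < cs.length
      · have hmin : min (60 * r + m) cs.length = 60 * r + m := by omega
        rw [hmin]
        have hdiv : (60 * r + m) / 60 = r := by omega
        have hmod : (60 * r + m) % 60 = m := by omega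
        unfold pvCell pvActK
        simp only [h, if_pos, hdiv, hmod]
        cases pvColors.get? (cs.getD (60 * r + m) ' ') with
        | none => simp; omega
        | some color => simp; omega
      · have hmin : min (60 * r + m) cs.length = cs.length := by omega
        have hmin' : min (60 * r + (m + 1)) cs.length = cs.length := by omega
        rw [hmin, hmin']
        have hnoop : pvCell cs (cy - 10 + (r : Int)) (cx - 30 + (m : Int))
            ((List.range' (60 * r) m).foldl (pvActK cs cx cy) g, cs.length)
            = ((List.range' (60 * r) m).foldl (pvActK cs cx cy) g, cs.length) := by
          unfold pvCell; simp
        rw [hnoop, pvActK_noop (by omega)]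

theorem pvOuter (cs : List Char) (cx cy : Int) :
    ∀ (R : Nat) (g : List (List String)),
      (List.range R).foldl
          (fun st (r : Nat) =>
            (PySem.List.pyRange (cx - 30) (cx + 30) 1).foldl
              (fun st' j => pvCell cs (cy - 10 + (r : Int)) j st') st)
          (g, 0)
        = ((List.range' 0 (60 * R)).foldl (pvActK cs cx cy) g, min (60 * R) cs.length) := by
  intro R
  induction R with
  | zero => intro g; simp
  | succ R ih =>
      intro g
      rw [List.range_succ, List.foldl_append, ih g]
      simp only [List.foldl_cons, List.foldl_nil]
      have hcat : List.range' 0 (60 * R) ++ List.range' (60 * R) 60 = List.range' 0 (60 * (R + 1)) := by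
        have := List.range'_append (s := 0) (m := 60 * R) (n := 60) (step := 1)
        simpa [Nat.mul_add, Nat.add_comm] using this
      by_cases h : 60 * R ≤ cs.length
      · have hmin : min (60 * R) cs.length = 60 * R := by omega
        rw [hmin]
        have hpr : PySem.List.pyRange (cx - 30) (cx + 30) 1
            = (List.range 60).map (fun (k : Nat) => (cx - 30) + (k : Int)) := by
          rw [PySem.List.pyRange_one]
          have h60 : (cx + 30 - (cx - 30)).toNat = 60 := by omega
          rw [h60]
        rw [hpr, List.foldl_map,
          pvInner cs cx cy R 60 (by omega) h ((List.range' 0 (60 * R)).foldl (pvActK cs cx cy) g)]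
        rw [← hcat, List.foldl_append]
        have : min (60 * R + 60) cs.length = min (60 * (R + 1)) cs.length := by omega
        rw [this]
      · have hmin : min (60 * R) cs.length = cs.length := by omega
        rw [hmin, pvInner_noop _ _ _ (le_refl _)]
        have hmin' : min (60 * (R + 1)) cs.length = cs.length := by omega
        rw [hmin', ← hcat, List.foldl_append]
        rw [pvFold_noop (List.range' (60 * R) 60) _
          (fun k hk => by rw [List.mem_range'_1] at hk; omega)]

-- A as a linear fold over the first 1200 positions
theorem pvA_eq (cd : List (List String)) (pi : String) (cx cy t : Int) :
    draw_pi_text cd pi cx cy t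
      = (List.range 1200).foldl
          (pvActK (PySem.Str.replace pi "." "").toList cx cy) cd := by
  unfold draw_pi_text
  have hpr : PySem.List.pyRange (cy - 10) (cy + 10) 1
      = (List.range 20).map (fun (k : Nat) => (cy - 10) + (k : Int)) := by
    rw [PySem.List.pyRange_one]
    have h20 : (cy + 10 - (cy - 10)).toNat = 20 := by omega
    rw [h20]
  rw [hpr, List.foldl_map, pvOuter (PySem.Str.replace pi "." "").toList cx cy 20 cd]
  rw [List.range_eq_range']

-- the tail positions k ≥ #digits never act, so the 1200-cap can be tightened to min
theorem pvRange_cut (cs : List Char) (cx cy : Int) (g : List (List String)) :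
    (List.range 1200).foldl (pvActK cs cx cy) g
      = (List.range (min 1200 cs.length)).foldl (pvActK cs cx cy) g := by
  by_cases h : 1200 ≤ cs.length
  · rw [Nat.min_eq_left h]
  · have hmin : min 1200 cs.length = cs.length := by omega
    rw [hmin]
    have hsplit : (1200 : Nat) = cs.length + (1200 - cs.length) := by omega
    rw [hsplit, List.range_add, List.foldl_append]
    rw [pvFold_noop (cs := cs) (cx := cx) (cy := cy)
      ((List.range (1200 - cs.length)).map (fun x => cs.length + x)) _ ?_]
    intro k hk
    simp only [List.mem_map] at hk
    obtain ⟨c, _, rfl⟩ := hk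
    omega

-- B-side: the palette lookup under the isdigit guard IS the dict lookup, character by character
theorem pvBridge (c : Char) :
    (if PySem.Chars.strIsdigit [c]
      then some (PySem.List.pyGetD pvPalette ((PySem.Int.ofChars? [c]).getD 0) "")
      else none) = pvColors.get? c := by
  by_cases h : 48 ≤ c.toNat ∧ c.toNat ≤ 57
  · obtain ⟨h1, h2⟩ := h
    have hc : Char.ofNat c.toNat = c := Char.ofNat_toNat c
    interval_cases hn : c.toNat <;> rw [← hc] <;> decide
  · have hd : PySem.Chars.strIsdigit [c] = false := by
      simp [PySem.Chars.strIsdigit, PySem.Chars.isdigit]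
      intro h1
      rw [Char.le_def, UInt32.le_iff_toNat_le] at h1
      rw [Char.lt_def, UInt32.lt_iff_toNat_lt]
      simp only [Char.toNat, show '0'.val.toNat = 48 from rfl] at h1 h
      simp only [show '9'.val.toNat = 57 from rfl]
      omega
    have hg : pvColors.get? c = none := by
      have hit : pvColors.items = [('0', "255 255 255 "), ('1', "255 0 0 "), ('2', "0 255 0 "),
        ('3', "0 0 255 "), ('4', "255 255 0 "), ('5', "255 0 255 "), ('6', "0 255 255 "),
        ('7', "128 128 128 "), ('8', "255 165 0 "), ('9', "0 128 0 ")] := by rfl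
      simp [PySem.Dict.get?]
      rw [hit]
      intro a b hmem
      fin_cases hmem <;> (intro he; subst he; exact h (by decide))
    rw [hd, hg]
    simp

theorem pvActBridge (c : Char) (i j : Int) (g : List (List String)) :
    (if PySem.Chars.strIsdigit [c]
      then pvSetCell g i j (PySem.List.pyGetD pvPalette ((PySem.Int.ofChars? [c]).getD 0) "")
      else g)
    = (match pvColors.get? c with
       | some color => pvSetCell g i j color
       | none => g) := by
  by_cases hb : PySem.Chars.strIsdigit [c] = true
  · have h2 := pvBridge c
    rw [if_pos hb] at h2
    rw [if_pos hb, ← h2]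
  · have h2 := pvBridge c
    rw [if_neg hb] at h2
    rw [if_neg hb, ← h2]

-- zip of a range-map with a list, as a map over the truncated range
theorem pvZipL {α β : Type} (f : Nat → α) (a : Nat) (ys : List β) (d : β) :
    ((List.range a).map f).zip ys
      = (List.range (min a ys.length)).map (fun i => (f i, ys.getD i d)) := by
  apply List.ext_getElem
  · simp
  · intro i h1 h2
    simp only [List.length_zip, List.length_map, List.length_range] at h1
    simp [List.getElem_zip, List.getD_eq_getElem?_getD, List.getElem?_eq_getElem (by omega : i < ys.length)]

-- B's inner pass on row r = the pvActK fold over the linear segment [60r, 60r+L)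
theorem pvInnerB (cs : List Char) (cx cy : Int) (r : Nat) :
    ∀ L : Nat, L ≤ min 60 (cs.length - 60 * r) → 60 * r ≤ cs.length →
      ∀ g : List (List String),
      (List.range L).foldl
          (fun g' (i : Nat) =>
            if PySem.Chars.strIsdigit [((cs.drop (60 * r)).take 60).getD i ' ']
            then pvSetCell g' (cy - 10 + (r : Int)) (cx - 30 + (i : Int))
                (PySem.List.pyGetD pvPalette
                  ((PySem.Int.ofChars? [((cs.drop (60 * r)).take 60).getD i ' ']).getD 0) "")
            else g') g
        = (List.range' (60 * r) L).foldl (pvActK cs cx cy) g := by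
  intro L
  induction L with
  | zero => intro _ _ g; rfl
  | succ L ih =>
      intro hL hr g
      rw [List.range_succ, List.foldl_append, ih (by omega) hr g]
      have hcat : List.range' (60 * r) L ++ [60 * r + L] = List.range' (60 * r) (L + 1) := by
        rw [List.range'_1_concat]
      rw [← hcat, List.foldl_append]
      simp only [List.foldl_cons, List.foldl_nil]
      have hlt : 60 * r + L < cs.length := by omega
      have hch : ((cs.drop (60 * r)).take 60).getD L ' ' = cs.getD (60 * r + L) ' ' := by
        rw [List.getD_eq_getElem?_getD, List.getD_eq_getElem?_getD, List.getElem?_take_of_lt (by omega : L < 60),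
          List.getElem?_drop]
      rw [hch, pvActBridge]
      have hdiv : (60 * r + L) / 60 = r := by omega
      have hmod : (60 * r + L) % 60 = L := by omega
      unfold pvActK
      rw [hdiv, hmod]

-- B's outer pass over the first R rows = the pvActK fold over [0, min (60R) n)
theorem pvOuterB (cs : List Char) (cx cy : Int) (m : Nat)
    (hm : m = (cs.length + 59) / 60) :
    ∀ R : Nat, R ≤ min 20 m → ∀ g : List (List String),
      (List.range R).foldl
          (fun g (r : Nat) =>
            (List.range (min 60 ((cs.drop (60 * r)).take 60).length)).foldl
              (fun g' (i : Nat) =>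
                if PySem.Chars.strIsdigit [((cs.drop (60 * r)).take 60).getD i ' ']
                then pvSetCell g' (cy - 10 + (r : Int)) (cx - 30 + (i : Int))
                    (PySem.List.pyGetD pvPalette
                      ((PySem.Int.ofChars? [((cs.drop (60 * r)).take 60).getD i ' ']).getD 0) "")
                else g') g) g
        = (List.range' 0 (min (60 * R) cs.length)).foldl (pvActK cs cx cy) g := by
  intro R
  induction R with
  | zero => intro _ g; simp
  | succ R ih =>
      intro hR g
      rw [List.range_succ, List.foldl_append, ih (by omega) g]
      simp only [List.foldl_cons, List.foldl_nil]
      have hrn : 60 * R < cs.length := by omega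
      have hlen : ((cs.drop (60 * R)).take 60).length = min 60 (cs.length - 60 * R) := by
        simp [List.length_take, List.length_drop]
      have hLe : min 60 ((cs.drop (60 * R)).take 60).length = min 60 (cs.length - 60 * R) := by
        rw [hlen]; omega
      rw [hLe, pvInnerB cs cx cy R (min 60 (cs.length - 60 * R)) (le_refl _) (by omega)]
      have hminR : min (60 * R) cs.length = 60 * R := by omega
      rw [hminR]
      have hcat : List.range' 0 (60 * R) ++ List.range' (60 * R) (min 60 (cs.length - 60 * R))
          = List.range' 0 (min (60 * (R + 1)) cs.length) := by
        have := List.range'_append (s := 0) (m := 60 * R)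
          (n := min 60 (cs.length - 60 * R)) (step := 1)
        have heq : 60 * R + min 60 (cs.length - 60 * R) = min (60 * (R + 1)) cs.length := by omega
        simpa [heq, Nat.add_comm] using this
      rw [← hcat, List.foldl_append]

-- B as the same linear fold
theorem pvB_eq (cd : List (List String)) (pi : String) (cx cy t : Int) :
    draw_pi_text_alt cd pi cx cy t
      = (List.range (min 1200 (PySem.Str.replace pi "." "").toList.length)).foldl
          (pvActK (PySem.Str.replace pi "." "").toList cx cy) cd := by
  unfold draw_pi_text_alt pvDigits
  set cs := (PySem.Str.replace pi "." "").toList with hcs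
  set n := cs.length with hn
  set m := (n + 59) / 60 with hm
  -- the chunk list is a map over List.range m
  have hchunks : pvChunks cs = (List.range m).map (fun k => (cs.drop (60 * k)).take 60) := by
    unfold pvChunks
    rw [PySem.List.pyRange_of_pos 0 (PySem.List.len cs) (by omega : (0:Int) < 60)]
    have hlen : PySem.List.len cs = (n : Int) := by simp [PySem.List.len, hn]
    rw [hlen]
    have hcnt : (if (0:Int) < (n : Int) then (((n : Int) - 0 + 60 - 1) / 60).toNat else 0) = m := by
      rw [hm]; split_ifs with h0 <;> omega
    rw [hcnt, List.map_map]
    apply List.map_congr_left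
    intro k _
    show PySem.List.slice cs (some (0 + 60 * (k : Int))) (some (0 + 60 * (k : Int) + 60))
        = (cs.drop (60 * k)).take 60
    have h1 : (0 : Int) + 60 * (k : Int) = ((60 * k : Nat) : Int) := by push_cast; ring
    have h2 : (0 : Int) + 60 * (k : Int) + 60 = ((60 * k : Nat) : Int) + ((60 : Nat) : Int) := by
      push_cast; ring
    rw [h2, h1, PySem.List.slice_natCast_add]
  rw [hchunks]
  -- the row range is a map over List.range 20
  have hrow : PySem.List.pyRange (cy - 10) (cy + 10) 1
      = (List.range 20).map (fun (r : Nat) => (cy - 10) + (r : Int)) := by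
    rw [PySem.List.pyRange_one]
    have h20 : (cy + 10 - (cy - 10)).toNat = 20 := by omega
    rw [h20]
  rw [hrow, pvZipL (fun r : Nat => (cy - 10) + (r : Int)) 20
        ((List.range m).map (fun k => (cs.drop (60 * k)).take 60)) [], List.foldl_map]
  rw [List.length_map, List.length_range]
  -- replace the chunk lookup by the chunk itself, and flatten the inner zip the same way
  have hcong : ∀ (g : List (List String)) (r : Nat), r ∈ List.range (min 20 m) →
      ((PySem.List.pyRange (cx - 30) (cx + 30) 1).zip
          (((List.range m).map (fun k => (cs.drop (60 * k)).take 60)).getD r [])).foldl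
        (fun g' q =>
          if PySem.Chars.strIsdigit [q.2]
          then pvSetCell g' ((cy - 10) + (r : Int)) q.1
              (PySem.List.pyGetD pvPalette ((PySem.Int.ofChars? [q.2]).getD 0) "")
          else g') g
      = (List.range (min 60 ((cs.drop (60 * r)).take 60).length)).foldl
          (fun g' (i : Nat) =>
            if PySem.Chars.strIsdigit [((cs.drop (60 * r)).take 60).getD i ' ']
            then pvSetCell g' (cy - 10 + (r : Int)) (cx - 30 + (i : Int))
                (PySem.List.pyGetD pvPalette
                  ((PySem.Int.ofChars? [((cs.drop (60 * r)).take 60).getD i ' ']).getD 0) "")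
            else g') g := by
    intro g r hr
    rw [List.mem_range] at hr
    have hget : ((List.range m).map (fun k => (cs.drop (60 * k)).take 60)).getD r []
        = (cs.drop (60 * r)).take 60 := by
      rw [List.getD_eq_getElem?_getD, List.getElem?_map, List.getElem?_range (by omega : r < m)]
      rfl
    rw [hget]
    have hcol : PySem.List.pyRange (cx - 30) (cx + 30) 1
        = (List.range 60).map (fun (i : Nat) => (cx - 30) + (i : Int)) := by
      rw [PySem.List.pyRange_one]
      have h60 : (cx + 30 - (cx - 30)).toNat = 60 := by omega
      rw [h60]
    rw [hcol, pvZipL (fun i : Nat => (cx - 30) + (i : Int)) 60 ((cs.drop (60 * r)).take 60) ' ',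
      List.foldl_map]
  rw [PySem.List.foldl_congr_mem _ _ _ _ hcong]
  have hK : min 20 m ≤ min 20 m := le_refl _
  rw [pvOuterB cs cx cy m hm (min 20 m) hK cd]
  have hfin : min (60 * min 20 m) n = min 1200 n := by omega
  rw [hfin, List.range_eq_range']

-- ===== VERDICT (by name: the statement is the Claim_ definition above) =====
theorem draw_pi_text_spec : Claim_equal_draw_pi_text := by
  intro cd pi cx cy t _ _
  unfold Spec_draw_pi_text
  rw [pvA_eq, pvB_eq, pvRange_cut]
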